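-- pv_equiv track=rewrite | github.com/OshaniSooriyaarachchi/ai-legal-assistant | ai-legal-assistant-backend/services/rag_service.py | _build_hybrid_context
-- ===== SOURCE A (Python) =====
-- from typing import List, Dict, Optional
--
-- def _build_hybrid_context(chunks: List[Dict]) -> str:
--     """Build context from multiple sources with source attribution"""
--     if not chunks:
--         return "Based on general legal knowledge and procedures:"
--
--     context_parts = []
--
--     # Group chunks by source type
--     public_chunks = [c for c in chunks if c.get('source_type') == 'public']
--     user_chunks = [c for c in chunks if c.get('source_type') == 'user']
--     session_chunks = [c for c in chunks if c.get('source_type') == 'session']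
--
--     # Add public knowledge base context
--     if public_chunks:
--         context_parts.append("=== LEGAL KNOWLEDGE BASE ===")
--         for chunk in public_chunks:
--             doc_title = chunk.get('document_title', 'Unknown Document')
--             category = chunk.get('document_category', 'General')
--             content = chunk.get('chunk_content', '')
--
--             context_parts.append(f"Source: {doc_title} ({category})")
--             context_parts.append(f"Content: {content}")
--             context_parts.append("---")
--
--     # Add user document context
--     if user_chunks:
--         context_parts.append("=== YOUR DOCUMENTS ===")
--         for chunk in user_chunks:
--             doc_title = chunk.get('document_title', 'Unknown Document')
--             content = chunk.get('chunk_content', '')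
--
--             context_parts.append(f"Source: {doc_title}")
--             context_parts.append(f"Content: {content}")
--             context_parts.append("---")
--
--     # Add session-specific context
--     if session_chunks:
--         context_parts.append("=== CURRENT SESSION DOCUMENTS ===")
--         for chunk in session_chunks:
--             doc_title = chunk.get('document_title', 'Unknown Document')
--             content = chunk.get('chunk_content', '')
--
--             context_parts.append(f"Source: {doc_title}")
--             context_parts.append(f"Content: {content}")
--             context_parts.append("---")
--
--     return "\n".join(context_parts)
-- ===== SOURCE B (Python) =====
-- _RANK = {'public': 0, 'user': 1, 'session': 2}
-- _HEADERS = ["=== LEGAL KNOWLEDGE BASE ===",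
--             "=== YOUR DOCUMENTS ===",
--             "=== CURRENT SESSION DOCUMENTS ==="]
--
-- def _build_hybrid_context(chunks):
--     """Build context from multiple sources with source attribution"""
--     if not chunks:
--         return "Based on general legal knowledge and procedures:"
--
--     # Stable sort by section rank (unknown source types dropped), then one
--     # group-by-change scan that emits a header whenever the rank changes.
--     ordered = sorted((c for c in chunks if c.get('source_type') in _RANK),
--                      key=lambda c: _RANK[c.get('source_type')])
--
--     parts = []
--     prev = -1
--     for c in ordered:
--         r = _RANK[c.get('source_type')]
--         if r != prev:
--             parts.append(_HEADERS[r])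
--             prev = r
--         title = c.get('document_title', 'Unknown Document')
--         if r == 0:
--             parts.append(f"Source: {title} ({c.get('document_category', 'General')})")
--         else:
--             parts.append(f"Source: {title}")
--         parts.append(f"Content: {c.get('chunk_content', '')}")
--         parts.append("---")
--     return "\n".join(parts)
-- ===== Notes on version B (the rewrite author's own statement) =====
-- stated objective: alternative
-- what changed: Replaces A's three filter passes with three copy-pasted emission blocks by a stable sort of the chunks on a section rank (public<user<session, unknowns dropped) followed by a single group-by-change scan that emits a header whenever the rank changes.
import Mathlib
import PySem

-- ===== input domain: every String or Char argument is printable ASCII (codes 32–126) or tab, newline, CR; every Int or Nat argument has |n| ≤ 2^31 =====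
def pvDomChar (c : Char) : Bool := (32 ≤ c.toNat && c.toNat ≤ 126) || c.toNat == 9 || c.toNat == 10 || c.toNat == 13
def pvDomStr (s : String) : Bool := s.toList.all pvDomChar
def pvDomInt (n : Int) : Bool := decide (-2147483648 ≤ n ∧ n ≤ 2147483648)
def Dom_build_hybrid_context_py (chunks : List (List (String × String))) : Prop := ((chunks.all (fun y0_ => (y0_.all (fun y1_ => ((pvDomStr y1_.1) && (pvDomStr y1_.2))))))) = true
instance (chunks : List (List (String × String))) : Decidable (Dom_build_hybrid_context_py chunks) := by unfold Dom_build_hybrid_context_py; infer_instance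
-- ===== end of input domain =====

-- B replaces A's three filter passes + three copy-pasted emission blocks by a stable sort
-- on a section rank followed by ONE group-by-change scan emitting headers on rank change.

-- ===== PORT A =====
-- dict.get(k) on the association-list chunk: first match (shared lookup helper)
def pvGet? (c : List (String × String)) (k : String) : Option String :=
  (c.find? (fun p => p.1 == k)).map (·.2)

-- dict.get(k, d)
def pvGetD (c : List (String × String)) (k d : String) : String :=
  (pvGet? c k).getD d

def build_hybrid_context_py (chunks : List (List (String × String))) : String :=
  if chunks = [] then "Based on general legal knowledge and procedures:" else
  let publicChunks := chunks.filter (fun c => pvGet? c "source_type" == some "public")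
  let userChunks := chunks.filter (fun c => pvGet? c "source_type" == some "user")
  let sessionChunks := chunks.filter (fun c => pvGet? c "source_type" == some "session")
  let parts : List String := []
  let parts := if publicChunks = [] then parts else
    publicChunks.foldl (fun acc c =>
      acc ++ ["Source: " ++ pvGetD c "document_title" "Unknown Document" ++ " (" ++
                pvGetD c "document_category" "General" ++ ")",
              "Content: " ++ pvGetD c "chunk_content" "", "---"])
      (parts ++ ["=== LEGAL KNOWLEDGE BASE ==="])
  let parts := if userChunks = [] then parts else
    userChunks.foldl (fun acc c =>
      acc ++ ["Source: " ++ pvGetD c "document_title" "Unknown Document",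
              "Content: " ++ pvGetD c "chunk_content" "", "---"])
      (parts ++ ["=== YOUR DOCUMENTS ==="])
  let parts := if sessionChunks = [] then parts else
    sessionChunks.foldl (fun acc c =>
      acc ++ ["Source: " ++ pvGetD c "document_title" "Unknown Document",
              "Content: " ++ pvGetD c "chunk_content" "", "---"])
      (parts ++ ["=== CURRENT SESSION DOCUMENTS ==="])
  PySem.Str.join "\n" parts

-- ===== PORT B =====
-- _RANK.get(c.get('source_type')) : section rank of a chunk (none = unknown source type)
def pvRank? (c : List (String × String)) : Option Nat :=
  match pvGet? c "source_type" with
  | some "public" => some 0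
  | some "user" => some 1
  | some "session" => some 2
  | _ => none

-- _HEADERS
def pvHeaders : List String :=
  ["=== LEGAL KNOWLEDGE BASE ===",
   "=== YOUR DOCUMENTS ===",
   "=== CURRENT SESSION DOCUMENTS ==="]

-- the three lines B appends for one chunk of rank r
def pvEmit (r : Nat) (c : List (String × String)) : List String :=
  [(if r = 0 then
      "Source: " ++ pvGetD c "document_title" "Unknown Document" ++ " (" ++
        pvGetD c "document_category" "General" ++ ")"
    else "Source: " ++ pvGetD c "document_title" "Unknown Document"),
   "Content: " ++ pvGetD c "chunk_content" "", "---"]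

-- loop body of B's single scan: state = (parts, prev rank as Int, -1 initially)
def pvScanStep (st : List String × Int) (c : List (String × String)) :
    List String × Int :=
  let r := (pvRank? c).getD 0
  let parts := if (r : Int) = st.2 then st.1 else st.1 ++ [pvHeaders.getD r ""]
  (parts ++ pvEmit r c, (r : Int))

def build_hybrid_context_py_alt (chunks : List (List (String × String))) : String :=
  if chunks = [] then "Based on general legal knowledge and procedures:" else
  let ordered := PySem.List.sorted (chunks.filter (fun c => (pvRank? c).isSome))
                   (fun c => (pvRank? c).getD 0)
  PySem.Str.join "\n" (ordered.foldl pvScanStep ([], -1)).1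

-- ===== PRECONDITION & SPEC =====
def Spec_build_hybrid_context_py (chunks : List (List (String × String))) (out : String) : Prop := out = build_hybrid_context_py_alt chunks
instance (chunks : List (List (String × String))) (out : String) : Decidable (Spec_build_hybrid_context_py chunks out) := by unfold Spec_build_hybrid_context_py; infer_instance

-- ===== CLAIM (what is proved, stated in full; the proofs are below) =====
def Claim_equal_build_hybrid_context_py : Prop := ∀ (chunks : List (List (String × String))), Dom_build_hybrid_context_py chunks → Spec_build_hybrid_context_py chunks (build_hybrid_context_py chunks)

-- ===== LEMMAS AND PROOFS =====

-- insertBy inserts after a prefix it does not go before, and before the rest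
theorem insertBy_middle {α : Type} (before : α → α → Bool) (x : α) (A B : List α)
    (hA : ∀ a ∈ A, before x a = false) (hB : ∀ b ∈ B, before x b = true) :
    PySem.List.insertBy before x (A ++ B) = A ++ x :: B := by
  induction A with
  | nil =>
    cases B with
    | nil => simp [PySem.List.insertBy]
    | cons b t => simp [PySem.List.insertBy, hB b (by simp)]
  | cons a t ih =>
    have := hA a (by simp)
    simp only [List.cons_append, PySem.List.insertBy, this, Bool.false_eq_true, if_false]
    rw [ih (fun a ha => hA a (by simp [ha]))]

-- the stable insertion sort on a {0,1,2}-valued key groups by key, preserving order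
theorem foldl_insert_grouped {α : Type} (key : α → Nat) (xs : List α)
    (A B C : List α)
    (hA : ∀ a ∈ A, key a = 0) (hB : ∀ b ∈ B, key b = 1) (hC : ∀ c ∈ C, key c = 2)
    (hx : ∀ x ∈ xs, key x ≤ 2) :
    xs.foldl (fun acc x => PySem.List.insertBy (fun a b => decide (key a < key b)) x acc)
        (A ++ B ++ C)
      = (A ++ xs.filter (fun x => key x = 0)) ++ (B ++ xs.filter (fun x => key x = 1))
          ++ (C ++ xs.filter (fun x => key x = 2)) := by
  induction xs generalizing A B C with
  | nil => simp
  | cons x t ih =>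
    have hx2 : key x ≤ 2 := hx x (by simp)
    have ht : ∀ y ∈ t, key y ≤ 2 := fun y hy => hx y (by simp [hy])
    rw [List.foldl_cons]
    interval_cases h : key x
    · have hA' : ∀ a ∈ A ++ [x], key a = 0 := by
        intro a ha
        rcases List.mem_append.mp ha with ha | ha
        · exact hA a ha
        · simp at ha; simp [ha, h]
      rw [show A ++ B ++ C = A ++ (B ++ C) from by simp,
        insertBy_middle _ x A (B ++ C)
          (fun a ha => by simp [hA a ha, h])
          (fun b hb => by
            rcases List.mem_append.mp hb with hb | hb
            · simp [hB b hb, h]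
            · simp [hC b hb, h]),
        show A ++ x :: (B ++ C) = (A ++ [x]) ++ B ++ C from by simp]
      rw [ih (A ++ [x]) B C hA' hB hC ht]
      simp [h]
    · have hB' : ∀ b ∈ B ++ [x], key b = 1 := by
        intro b hb
        rcases List.mem_append.mp hb with hb | hb
        · exact hB b hb
        · simp at hb; simp [hb, h]
      rw [show A ++ B ++ C = (A ++ B) ++ C from by simp,
        insertBy_middle _ x (A ++ B) C
          (fun a ha => by
            rcases List.mem_append.mp ha with ha | ha
            · simp [hA a ha, h]
            · simp [hB a ha, h])
          (fun c hc => by simp [hC c hc, h]),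
        show (A ++ B) ++ x :: C = A ++ (B ++ [x]) ++ C from by simp]
      rw [ih A (B ++ [x]) C hA hB' hC ht]
      simp [h]
    · have hC' : ∀ c ∈ C ++ [x], key c = 2 := by
        intro c hc
        rcases List.mem_append.mp hc with hc | hc
        · exact hC c hc
        · simp at hc; simp [hc, h]
      rw [PySem.List.insertBy_of_forall_not_before _ x (A ++ B ++ C)
          (by intro a ha
              simp only [List.mem_append] at ha
              rcases ha with (ha | ha) | ha
              · simp [hA a ha, h]
              · simp [hB a ha, h]
              · simp [hC a ha, h]),
        show (A ++ B ++ C) ++ [x] = A ++ B ++ (C ++ [x]) from by simp]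
      rw [ih A B (C ++ [x]) hA hB hC' ht]
      simp [h]

-- B's scan over a constant-rank run with prev = r: no header, just the bodies
theorem scan_same (r : Nat) (xs : List (List (String × String)))
    (h : ∀ c ∈ xs, (pvRank? c).getD 0 = r) (p : List String) :
    xs.foldl pvScanStep (p, (r : Int))
      = (p ++ xs.flatMap (pvEmit r), (r : Int)) := by
  induction xs generalizing p with
  | nil => simp
  | cons c t ih =>
    have hc := h c (by simp)
    rw [List.foldl_cons, show pvScanStep (p, (r : Int)) c = (p ++ pvEmit r c, (r : Int)) from by
      simp [pvScanStep, hc]]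
    rw [ih (fun c hc => h c (by simp [hc]))]
    simp

-- B's scan over a constant-rank group with prev ≠ r: header once, then the bodies
theorem scan_group (r : Nat) (xs : List (List (String × String)))
    (h : ∀ c ∈ xs, (pvRank? c).getD 0 = r) (p : List String) (prev : Int)
    (hne : prev ≠ (r : Int)) :
    xs.foldl pvScanStep (p, prev)
      = (p ++ (if xs = [] then [] else pvHeaders.getD r "" :: xs.flatMap (pvEmit r)),
         if xs = [] then prev else (r : Int)) := by
  cases xs with
  | nil => simp
  | cons c t =>
    have hc := h c (by simp)
    rw [List.foldl_cons, show pvScanStep (p, prev) c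
        = ((p ++ [pvHeaders.getD r ""]) ++ pvEmit r c, (r : Int)) from by
      simp [pvScanStep, hc, Ne.symm hne]]
    rw [scan_same r t (fun c hc => h c (by simp [hc]))]
    simp

-- the chunks of rank r are exactly the chunks whose source_type matches
theorem filter_rank_eq (chunks : List (List (String × String))) (r : Nat) :
    (chunks.filter (fun c => (pvRank? c).isSome)).filter (fun c => (pvRank? c).getD 0 = r)
      = chunks.filter (fun c => pvRank? c == some r) := by
  rw [List.filter_filter]
  apply List.filter_congr
  intro c _
  rcases h : pvRank? c with _ | v
  · simp [h]
  · by_cases hv : v = r <;> simp [hv]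


theorem rank_public (c : List (String × String)) :
    (pvRank? c == some 0) = (pvGet? c "source_type" == some "public") := by
  unfold pvRank?
  rcases h : pvGet? c "source_type" with _ | s
  · simp
  · by_cases h0 : s = "public"
    · simp [h0]
    · by_cases h1 : s = "user"
      · simp [h1]
      · by_cases h2 : s = "session" <;> simp [h0, h1, h2]

theorem rank_user (c : List (String × String)) :
    (pvRank? c == some 1) = (pvGet? c "source_type" == some "user") := by
  unfold pvRank?
  rcases h : pvGet? c "source_type" with _ | s
  · simp
  · by_cases h0 : s = "public"
    · simp [h0]
    · by_cases h1 : s = "user"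
      · simp [h1]
      · by_cases h2 : s = "session" <;> simp [h0, h1, h2]

theorem rank_session (c : List (String × String)) :
    (pvRank? c == some 2) = (pvGet? c "source_type" == some "session") := by
  unfold pvRank?
  rcases h : pvGet? c "source_type" with _ | s
  · simp
  · by_cases h0 : s = "public"
    · simp [h0]
    · by_cases h1 : s = "user"
      · simp [h1]
      · by_cases h2 : s = "session" <;> simp [h0, h1, h2]

-- membership in a rank-r filter fixes the rank
theorem mem_filter_rank (chunks : List (List (String × String))) (r : Nat) (c : List (String × String))
    (hc : c ∈ chunks.filter (fun c => pvRank? c == some r)) : (pvRank? c).getD 0 = r := by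
  have := (List.mem_filter.mp hc).2
  simp only [beq_iff_eq] at this
  simp [this]

-- flatMap of the per-chunk emission, with the rank test reduced (bridges B's pvEmit
-- to the literal line lists A's loops append)
theorem flatMap_emit0 (xs : List (List (String × String))) :
    List.flatMap (pvEmit 0) xs
      = (xs.map (fun c =>
          ["Source: " ++ pvGetD c "document_title" "Unknown Document" ++ " (" ++
             pvGetD c "document_category" "General" ++ ")",
           "Content: " ++ pvGetD c "chunk_content" "", "---"])).flatten := by
  induction xs with
  | nil => simp
  | cons c t ih => simp [pvEmit, ih]

theorem flatMap_emit1 (xs : List (List (String × String))) :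
    List.flatMap (pvEmit 1) xs
      = (xs.map (fun c =>
          ["Source: " ++ pvGetD c "document_title" "Unknown Document",
           "Content: " ++ pvGetD c "chunk_content" "", "---"])).flatten := by
  induction xs with
  | nil => simp
  | cons c t ih => simp [pvEmit, ih]

theorem flatMap_emit2 (xs : List (List (String × String))) :
    List.flatMap (pvEmit 2) xs
      = (xs.map (fun c =>
          ["Source: " ++ pvGetD c "document_title" "Unknown Document",
           "Content: " ++ pvGetD c "chunk_content" "", "---"])).flatten := by
  induction xs with
  | nil => simp
  | cons c t ih => simp [pvEmit, ih]

-- ===== VERDICT (by name: the statement is the Claim_ definition above) =====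
theorem build_hybrid_context_py_spec : Claim_equal_build_hybrid_context_py := by
  intro chunks _
  unfold Spec_build_hybrid_context_py build_hybrid_context_py build_hybrid_context_py_alt
  by_cases h : chunks = []
  · simp [h]
  · simp only [h, if_false]
    set F0 := chunks.filter (fun c => pvRank? c == some 0) with hF0
    set F1 := chunks.filter (fun c => pvRank? c == some 1) with hF1
    set F2 := chunks.filter (fun c => pvRank? c == some 2) with hF2
    have hsorted : PySem.List.sorted (chunks.filter (fun c => (pvRank? c).isSome))
        (fun c => (pvRank? c).getD 0) = F0 ++ F1 ++ F2 := by
      rw [PySem.List.sorted_eq_foldl_insertBy]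
      have hle : ∀ x ∈ chunks.filter (fun c => (pvRank? c).isSome),
          (pvRank? x).getD 0 ≤ 2 := by
        intro x _
        unfold pvRank?
        split <;> simp
      have := foldl_insert_grouped (fun c => (pvRank? c).getD 0)
        (chunks.filter (fun c => (pvRank? c).isSome)) [] [] []
        (by simp) (by simp) (by simp) hle
      simp only [List.nil_append, List.append_nil] at this
      rw [this]
      rw [filter_rank_eq chunks 0, filter_rank_eq chunks 1, filter_rank_eq chunks 2]
    rw [hsorted, List.foldl_append, List.foldl_append,
      scan_group 0 F0 (mem_filter_rank chunks 0) [] (-1) (by decide),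
      scan_group 1 F1 (mem_filter_rank chunks 1) _ _ (by split_ifs <;> decide),
      scan_group 2 F2 (mem_filter_rank chunks 2) _ _ (by split_ifs <;> decide)]
    have hA0 : (chunks.filter (fun c => pvGet? c "source_type" == some "public")) = F0 := by
      rw [hF0]; exact List.filter_congr (fun c _ => (rank_public c).symm)
    have hA1 : (chunks.filter (fun c => pvGet? c "source_type" == some "user")) = F1 := by
      rw [hF1]; exact List.filter_congr (fun c _ => (rank_user c).symm)
    have hA2 : (chunks.filter (fun c => pvGet? c "source_type" == some "session")) = F2 := by
      rw [hF2]; exact List.filter_congr (fun c _ => (rank_session c).symm)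
    rw [hA0, hA1, hA2]
    by_cases h0 : F0 = [] <;> by_cases h1 : F1 = [] <;> by_cases h2 : F2 = [] <;>
      simp [h0, h1, h2, PySem.List.foldl_append_eq_flatMap, flatMap_emit0, flatMap_emit1, flatMap_emit2, pvHeaders]
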